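-- pv_equiv track=rewrite | github.com/wyooyw/PolyCIM | polycim/passes/multi_level_tiling_pass.py | change_dim_types_for_pre_tiling
-- ===== SOURCE A (Python) =====
-- def change_dim_types_for_pre_tiling(split_factors, dim_types):
--     new_dim_types = []
--     for dim, dim_factors in enumerate(split_factors):
--         if len(dim_factors) == 1:
--             new_dim_types.append(dim_types[dim])
--         elif len(dim_factors) == 2:
--             new_dim_types.append(f"{dim_types[dim]}_o")
--             new_dim_types.append(f"{dim_types[dim]}_i")
--         elif len(dim_factors) == 3:
--             new_dim_types.append(f"{dim_types[dim]}_o")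
--             new_dim_types.append(f"{dim_types[dim]}_m")
--             new_dim_types.append(f"{dim_types[dim]}_i")
--         else:
--             raise ValueError(f"dim_factors={dim_factors} is not supported")
--     return new_dim_types
-- ===== SOURCE B (Python) =====
-- def _pos_suffix(j, k):
--     # suffix by position within the k expanded labels: outer / middle / inner
--     if k == 1:
--         return ""
--     return "_o" if j == 0 else ("_i" if j == k - 1 else "_m")
--
--
-- def change_dim_types_for_pre_tiling(split_factors, dim_types):
--     if not split_factors:
--         return []
--     k = len(split_factors[0])
--     head = [dim_types[0] + _pos_suffix(j, k) for j in range(k)]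
--     return head + change_dim_types_for_pre_tiling(split_factors[1:], dim_types[1:])
-- ===== Notes on version B (the rewrite author's own statement) =====
-- stated objective: alternative
-- what changed: Replaces A's iterative enumerate loop with an if/elif chain on the factor count by structural recursion on the two lists, where each expanded label's suffix is computed positionally ('' for a single factor, else _o for the first, _i for the last, _m in between) instead of being listed case by case; the positional rule makes B total on any factor count.
import Mathlib
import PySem

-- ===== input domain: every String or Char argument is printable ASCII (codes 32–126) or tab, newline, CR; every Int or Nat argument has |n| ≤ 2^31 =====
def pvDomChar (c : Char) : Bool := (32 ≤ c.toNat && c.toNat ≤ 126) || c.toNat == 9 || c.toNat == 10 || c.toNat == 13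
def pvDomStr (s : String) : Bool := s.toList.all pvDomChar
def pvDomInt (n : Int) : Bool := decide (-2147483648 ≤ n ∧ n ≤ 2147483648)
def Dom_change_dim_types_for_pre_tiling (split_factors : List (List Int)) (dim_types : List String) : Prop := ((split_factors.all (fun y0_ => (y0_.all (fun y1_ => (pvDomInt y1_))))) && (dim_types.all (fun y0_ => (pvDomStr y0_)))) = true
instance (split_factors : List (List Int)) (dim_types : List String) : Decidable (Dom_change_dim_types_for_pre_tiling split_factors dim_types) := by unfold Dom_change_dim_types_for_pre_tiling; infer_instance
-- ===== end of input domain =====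

-- B replaces A's iterative if/elif chain on the factor count by structural recursion on
-- the two lists with a positional suffix rule (first→_o, last→_i, middle→_m, single→'');
-- return values agree on all inputs where A returns (alternative decomposition).

-- ===== PORT A =====
-- for dim, dim_factors in enumerate(split_factors): append according to len(dim_factors).
-- dim_types[dim] is ported as pyGet? with getD "": Pre_ guarantees the index is in range,
-- and the 'else: raise ValueError' branch (excluded by Pre_) appends nothing.
def change_dim_types_for_pre_tiling (split_factors : List (List Int)) (dim_types : List String) : List String :=
  (PySem.List.enumerate split_factors 0).foldl
    (fun acc p =>
      let t := (PySem.List.pyGet? dim_types p.1).getD ""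
      if p.2.length = 1 then acc ++ [t]
      else if p.2.length = 2 then acc ++ [t ++ "_o", t ++ "_i"]
      else if p.2.length = 3 then acc ++ [t ++ "_o", t ++ "_m", t ++ "_i"]
      else acc) []

-- ===== PORT B =====
-- _pos_suffix(j, k) from Source B, branch for branch.
def pvPosSuffix (j k : Nat) : String :=
  if k = 1 then "" else if j = 0 then "_o" else if j = k - 1 then "_i" else "_m"

-- recursion of Source B: empty → []; else expand head ([dim_types[0] + suffix for j in range(k)])
-- and recurse on the [1:]-slices (ported exactly as List.drop 1); dim_types[0] is pyGet? with
-- getD "" (IndexError excluded by Pre_).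
def change_dim_types_for_pre_tiling_alt (split_factors : List (List Int)) (dim_types : List String) : List String :=
  match split_factors with
  | [] => []
  | df :: rest =>
      ((List.range df.length).map
        (fun j => (PySem.List.pyGet? dim_types 0).getD "" ++ pvPosSuffix j df.length))
      ++ change_dim_types_for_pre_tiling_alt rest (dim_types.drop 1)

-- ===== PRECONDITION & SPEC =====
-- Pre_ excludes exactly the inputs on which Python A raises: an index beyond dim_types
-- (IndexError) or a factor list whose length is not 1, 2 or 3 (ValueError).
def Pre_change_dim_types_for_pre_tiling (split_factors : List (List Int)) (dim_types : List String) : Prop :=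
  split_factors.length ≤ dim_types.length ∧
  ∀ df ∈ split_factors, df.length = 1 ∨ df.length = 2 ∨ df.length = 3

instance (split_factors : List (List Int)) (dim_types : List String) : Decidable (Pre_change_dim_types_for_pre_tiling split_factors dim_types) := by unfold Pre_change_dim_types_for_pre_tiling; infer_instance

def pvWitness_change_dim_types_for_pre_tiling : List (List Int) × List String :=
  ([[2], [3, 4], [1, 2, 3]], ["a", "b", "c"])

def Spec_change_dim_types_for_pre_tiling (split_factors : List (List Int)) (dim_types : List String) (out : List String) : Prop := out = change_dim_types_for_pre_tiling_alt split_factors dim_types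
instance (split_factors : List (List Int)) (dim_types : List String) (out : List String) : Decidable (Spec_change_dim_types_for_pre_tiling split_factors dim_types out) := by unfold Spec_change_dim_types_for_pre_tiling; infer_instance

-- ===== CLAIM (what is proved, stated in full; the proofs are below) =====
def Claim_equal_change_dim_types_for_pre_tiling : Prop := ∀ (split_factors : List (List Int)) (dim_types : List String), Dom_change_dim_types_for_pre_tiling split_factors dim_types → Pre_change_dim_types_for_pre_tiling split_factors dim_types → Spec_change_dim_types_for_pre_tiling split_factors dim_types (change_dim_types_for_pre_tiling split_factors dim_types)

-- ===== LEMMAS AND PROOFS =====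

-- A's per-dimension chunk (what one loop iteration appends, given the dim type t).
def pvChunkA (t : String) (df : List Int) : List String :=
  if df.length = 1 then [t]
  else if df.length = 2 then [t ++ "_o", t ++ "_i"]
  else if df.length = 3 then [t ++ "_o", t ++ "_m", t ++ "_i"]
  else []

theorem pvChunkA_eq_pos (t : String) (df : List Int)
    (h : df.length = 1 ∨ df.length = 2 ∨ df.length = 3) :
    pvChunkA t df = (List.range df.length).map (fun j => t ++ pvPosSuffix j df.length) := by
  rcases h with h | h | h <;>
    simp [pvChunkA, pvPosSuffix, h, List.range_succ]

theorem pvEnum_flatMap (split_factors : List (List Int)) (dim_types : List String) (k : Nat)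
    (hlen : k + split_factors.length ≤ dim_types.length)
    (hok : ∀ df ∈ split_factors, df.length = 1 ∨ df.length = 2 ∨ df.length = 3) :
    (PySem.List.enumerate split_factors (k : Int)).flatMap
        (fun p => pvChunkA ((PySem.List.pyGet? dim_types p.1).getD "") p.2)
      = change_dim_types_for_pre_tiling_alt split_factors (dim_types.drop k) := by
  induction split_factors generalizing k dim_types with
  | nil => simp [PySem.List.enumerate_nil, change_dim_types_for_pre_tiling_alt]
  | cons df rest ih =>
    have hk : k < dim_types.length := by simp at hlen; omega
    have hcast : (k : Int) + 1 = ((k + 1 : Nat) : Int) := by push_cast; ring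
    rw [PySem.List.enumerate_cons, hcast]
    simp only [List.flatMap_cons, change_dim_types_for_pre_tiling_alt]
    rw [ih dim_types (k + 1) (by simp at hlen ⊢; omega)
        (fun df hdf => hok df (List.mem_cons_of_mem _ hdf))]
    have hdrop1 : (dim_types.drop k).drop 1 = dim_types.drop (k + 1) := by
      rw [List.drop_drop]
    have hget : (PySem.List.pyGet? (dim_types.drop k) 0).getD ""
        = (PySem.List.pyGet? dim_types (k : Int)).getD "" := by
      rw [PySem.List.pyGet?_zero, PySem.List.pyGet?_natCast,
        List.getElem?_drop, Nat.add_zero]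
    rw [hdrop1, hget, pvChunkA_eq_pos _ _ (hok df (List.mem_cons_self ..))]

-- ===== VERDICT (by name: the statement is the Claim_ definition above) =====
theorem change_dim_types_for_pre_tiling_spec : Claim_equal_change_dim_types_for_pre_tiling := by
  intro split_factors dim_types _ hpre
  unfold Spec_change_dim_types_for_pre_tiling change_dim_types_for_pre_tiling
  have hbody : (fun (acc : List String) (p : Int × List Int) =>
      let t := (PySem.List.pyGet? dim_types p.1).getD ""
      if p.2.length = 1 then acc ++ [t]
      else if p.2.length = 2 then acc ++ [t ++ "_o", t ++ "_i"]
      else if p.2.length = 3 then acc ++ [t ++ "_o", t ++ "_m", t ++ "_i"]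
      else acc)
    = (fun acc p => acc ++ pvChunkA ((PySem.List.pyGet? dim_types p.1).getD "") p.2) := by
    funext acc p; simp only [pvChunkA]; split_ifs <;> simp
  rw [hbody, PySem.List.foldl_append_eq_flatMap, List.nil_append]
  have h0 : (0 : Int) = ((0 : Nat) : Int) := rfl
  rw [h0, pvEnum_flatMap split_factors dim_types 0 (by simpa using hpre.1) hpre.2]
  simp
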